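-- pv_equiv track=rewrite | github.com/miliar/Code_Jam_Webscraper | solutions_python/Problem_148/177.py | process_func
-- ===== SOURCE A (Python) =====
-- def process_func(func_input):
--     N, X, F = func_input
--     SF = sorted(F)
--     D = []
--     i = len(SF) - 1
--     while True:
--         #print '-', SF
--         if SF == []:
--             break
--         if i < 0:
--             break
--         s = SF.pop(0)
--         if SF == []:
--             D.append(s)
--             break
--         if i > len(SF) - 1:
--             i = len(SF) - 1
--         i = len(SF) - 1
--         while SF[i] + s > X and i > 0:
--             i -= 1
--         if SF[i] + s > X:
--             D.append(s)
--             break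
--         l = SF.pop(i)
--         D.append(l + s)
--         i -= 1
--         #print SF,
--         #print D
--     #print 'f',SF,D
--     return len(SF) + len(D)
-- ===== SOURCE B (Python) =====
-- def process_func(func_input):
--     N, X, F = func_input
--     a = sorted(F)
--     lo, hi, groups = 0, len(a) - 1, 0
--     while lo <= hi:
--         if lo < hi and a[lo] + a[hi] <= X:
--             lo += 1
--         hi -= 1
--         groups += 1
--     return groups
-- ===== Notes on version B (the rewrite author's own statement) =====
-- stated objective: faster
-- what changed: Replaces A's repeated pop(0) plus a linear downward scan for the largest fitting partner (quadratic list surgery) by the classic two-pointer sweep over the sorted array: pair the smallest with the largest when they fit, otherwise the largest goes alone; same maximum-matching count.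
import Mathlib
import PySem

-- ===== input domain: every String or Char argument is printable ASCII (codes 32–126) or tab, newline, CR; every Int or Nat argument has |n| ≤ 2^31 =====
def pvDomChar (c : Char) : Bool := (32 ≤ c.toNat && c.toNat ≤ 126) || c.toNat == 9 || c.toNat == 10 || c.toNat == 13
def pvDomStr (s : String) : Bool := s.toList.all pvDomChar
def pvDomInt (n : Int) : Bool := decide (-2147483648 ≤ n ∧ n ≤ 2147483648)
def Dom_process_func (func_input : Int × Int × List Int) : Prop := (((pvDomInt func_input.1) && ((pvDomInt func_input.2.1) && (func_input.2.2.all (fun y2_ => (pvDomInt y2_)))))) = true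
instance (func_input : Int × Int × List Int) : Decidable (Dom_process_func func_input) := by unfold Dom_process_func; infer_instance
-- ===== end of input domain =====

-- B replaces A's pop(0) + downward scan for the largest fitting partner (quadratic list
-- surgery) by the classic two-pointer sweep over the sorted array; faster (asymptotic).

-- ===== PORT A =====
-- inner while: `while SF[i] + s > X and i > 0: i -= 1`, started at i = len(SF)-1.
-- Indexing is always in range here (0 ≤ i < len SF), so List.getD is exact for SF[i].
def scanA (SF : List Int) (s X : Int) : Nat → Nat
  | 0 => 0
  | j + 1 => if X < SF.getD (j + 1) 0 + s then scanA SF s X j else j + 1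

-- the outer `while True` of A; each pass pops the head (pop(0)), so SF shrinks.
-- The two Python assignments `if i > len(SF)-1: i = len(SF)-1` and `i = len(SF)-1`
-- jointly set i to len(SF)-1; the scan then runs from that top index.
def loopA (X : Int) (SF D : List Int) (i : Int) : Int :=
  match SF with
  | [] => (D.length : Int)                                   -- `if SF == []: break`
  | s :: SF' =>
    if i < 0 then ((SF'.length + 1 : Nat) : Int) + D.length  -- `if i < 0: break`
    else if hSF' : SF' = [] then ((D ++ [s]).length : Int)   -- lone last element
    else
      let j := scanA SF' s X (SF'.length - 1)
      if X < SF'.getD j 0 + s then                           -- nothing fits: s alone, break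
        (SF'.length : Int) + ((D ++ [s]).length : Int)
      else                                                   -- l = SF.pop(i); D.append(l+s)
        loopA X (SF'.eraseIdx j) (D ++ [SF'.getD j 0 + s]) ((j : Int) - 1)
termination_by SF.length
decreasing_by simp [List.length_eraseIdx]; split <;> omega

def process_func (func_input : Int × Int × List Int) : Int :=
  let X := func_input.2.1
  let SF := PySem.List.sorted func_input.2.2 (fun x => x) false
  loopA X SF [] ((SF.length : Int) - 1)

-- ===== PORT B =====
-- two-pointer sweep: `while lo <= hi: if lo < hi and a[lo]+a[hi] <= X: lo += 1; hi -= 1; groups += 1`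
def loopB (a : List Int) (X : Int) (lo hi groups : Int) : Int :=
  if h : lo ≤ hi then
    let lo' := if lo < hi ∧ PySem.List.pyGetD a lo 0 + PySem.List.pyGetD a hi 0 ≤ X then lo + 1 else lo
    loopB a X lo' (hi - 1) (groups + 1)
  else groups
termination_by (hi + 1 - lo).toNat
decreasing_by all_goals (split <;> omega)

def process_func_alt (func_input : Int × Int × List Int) : Int :=
  let X := func_input.2.1
  let a := PySem.List.sorted func_input.2.2 (fun x => x) false
  loopB a X 0 ((a.length : Int) - 1) 0

-- ===== PRECONDITION & SPEC =====
def Spec_process_func (func_input : Int × Int × List Int) (out : Int) : Prop := out = process_func_alt func_input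
instance (func_input : Int × Int × List Int) (out : Int) : Decidable (Spec_process_func func_input out) := by unfold Spec_process_func; infer_instance

-- ===== CLAIM (what is proved, stated in full; the proofs are below) =====
def Claim_equal_process_func : Prop := ∀ (func_input : Int × Int × List Int), Dom_process_func func_input → Spec_process_func func_input (process_func func_input)

-- ===== LEMMAS AND PROOFS =====

-- the common mathematical shape: greedy pairing on a sorted list, head with last
def gG (X : Int) : List Int → Int
  | [] => 0
  | [_] => 1
  | s :: b :: r =>
    if s + (b :: r).getD ((b :: r).length - 1) 0 ≤ X then 1 + gG X ((b :: r).dropLast)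
    else 1 + gG X (s :: (b :: r).dropLast)
termination_by l => l.length
decreasing_by all_goals simp [List.length_dropLast]

-- index congruence glue for getElem
lemma getElem_idx_eq {α : Type} (l : List α) (i j : Nat) (hij : i = j) (hj : j < l.length) :
    l[i]'(hij ▸ hj) = l[j] := by subst hij; rfl

-- ---- facts about A's inner downward scan ----

lemma scanA_le (SF : List Int) (s X : Int) (m : Nat) : scanA SF s X m ≤ m := by
  induction m with
  | zero => simp [scanA]
  | succ j ih => simp only [scanA]; split <;> omega

lemma scanA_gt (SF : List Int) (s X : Int) (m : Nat) :
    ∀ k, scanA SF s X m < k → k ≤ m → X < SF.getD k 0 + s := by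
  induction m with
  | zero => intro k h1 h2; omega
  | succ j ih =>
    intro k h1 h2
    simp only [scanA] at h1
    split at h1
    · by_cases hk : k = j + 1
      · subst hk; assumption
      · exact ih k h1 (by omega)
    · omega

lemma scanA_fit (SF : List Int) (s X : Int) (m : Nat) (h : 0 < scanA SF s X m) :
    SF.getD (scanA SF s X m) 0 + s ≤ X := by
  induction m with
  | zero => simp [scanA] at h
  | succ j ih =>
    by_cases hc : X < SF.getD (j + 1) 0 + s
    · simp only [scanA, if_pos hc] at h ⊢; exact ih h
    · simp only [scanA, if_neg hc] at h ⊢; omega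

-- ---- facts about gG ----

lemma gG_len_one (X : Int) (l : List Int) (h : l.length = 1) : gG X l = 1 := by
  match l, h with
  | [x], _ => simp [gG]

lemma eraseIdx_last : ∀ (l : List Int), l.eraseIdx (l.length - 1) = l.dropLast
  | [] => rfl
  | [_] => rfl
  | x :: y :: ys => by
    have ih := eraseIdx_last (y :: ys)
    simp only [List.length_cons, Nat.add_sub_cancel] at ih ⊢
    simpa [List.eraseIdx] using ih

lemma lastD_concat (l : List Int) (h : Int) :
    (l ++ [h]).getD ((l ++ [h]).length - 1) 0 = h := by
  rw [List.getD_eq_getElem?_getD]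
  rw [show (l ++ [h]).length - 1 = l.length from by simp]
  rw [List.getElem?_concat_length]
  rfl

-- appending an element h that pairs with nothing costs exactly one extra group
lemma gG_append_last (X h : Int) (M : List Int) (hgt : ∀ x ∈ M, X < x + h) :
    gG X (M ++ [h]) = 1 + gG X M := by
  match M with
  | [] => simp [gG]
  | [s] =>
    have hs := hgt s (by simp)
    have hns : ¬ (s + h ≤ X) := by omega
    simp [gG, hns]
  | s :: b :: r =>
    have hs := hgt s (by simp)
    have hlast := lastD_concat (b :: r) h
    have hdrop : ((b :: r) ++ [h]).dropLast = b :: r := List.dropLast_concat ..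
    simp only [List.cons_append] at hlast hdrop ⊢
    conv_lhs => rw [gG]
    rw [hlast, hdrop, if_neg (by omega)]

lemma pairwise_gt_of (X s : Int) : ∀ (L : List Int), L.Pairwise (· ≤ ·) →
    (∀ x ∈ L, s ≤ x) → (∀ x ∈ L, X < s + x) → L.Pairwise (fun a b => X < a + b) := by
  intro L
  induction L with
  | nil => simp
  | cons a t ih =>
    intro hpw hs hall
    rw [List.pairwise_cons] at hpw ⊢
    refine ⟨fun b hb => ?_, ih hpw.2 (fun x hx => hs x (by simp [hx])) (fun x hx => hall x (by simp [hx]))⟩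
    have h1 := hall b (by simp [hb])
    have h2 := hs a (by simp)
    omega

-- when no two elements fit together, every element is its own group
lemma gG_singles (X : Int) : ∀ (n : Nat) (M : List Int), M.length ≤ n →
    M.Pairwise (fun a b => X < a + b) → gG X M = (M.length : Int) := by
  intro n
  induction n with
  | zero =>
    intro M h _
    have : M = [] := List.eq_nil_of_length_eq_zero (by omega)
    subst this; simp [gG]
  | succ n ih =>
    intro M hlen hpw
    match M with
    | [] => simp [gG]
    | [x] => simp [gG]
    | s :: b :: r =>
      have hmem : (b :: r).getD ((b :: r).length - 1) 0 ∈ b :: r := by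
        rw [List.getD_eq_getElem _ 0 (by simp)]
        exact List.getElem_mem ..
      have hrel := List.rel_of_pairwise_cons hpw hmem
      have hsub : (s :: (b :: r).dropLast).Sublist (s :: b :: r) :=
        List.Sublist.cons₂ s (List.dropLast_sublist _)
      have hpw' := hpw.sublist hsub
      have hlen' : (s :: (b :: r).dropLast).length ≤ n := by
        simp only [List.length_cons, List.length_dropLast] at hlen ⊢; omega
      rw [gG, if_neg (by omega), ih _ hlen' hpw']
      simp only [List.length_cons, List.length_dropLast]
      push_cast; ring

-- KEY: pairing the head with the LARGEST element that fits costs exactly one group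
lemma gG_key (X : Int) : ∀ (n : Nat) (s : Int) (M : List Int), M.length ≤ n →
    (s :: M).Pairwise (· ≤ ·) →
    ∀ (j : Nat) (hj : j < M.length), s + M[j] ≤ X →
    (∀ (k : Nat) (hk : k < M.length), j < k → X < s + M[k]) →
    gG X (s :: M) = 1 + gG X (M.eraseIdx j) := by
  intro n
  induction n with
  | zero => intro s M hlen _ j hj _ _; omega
  | succ n ih =>
    intro s M hlen hpw j hj hfit hmax
    match M with
    | [] => simp at hj
    | b :: r =>
      have hlp : 0 < (b :: r).length := by simp
      by_cases hjlast : j = (b :: r).length - 1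
      · subst hjlast
        have hlast : (b :: r).getD ((b :: r).length - 1) 0 = (b :: r)[(b :: r).length - 1]'hj :=
          List.getD_eq_getElem _ 0 hj
        rw [eraseIdx_last]
        conv_lhs => rw [gG]
        rw [hlast]
        split
        · rfl
        · exact absurd hfit ‹¬_›
      · have hj' : j < (b :: r).length - 1 := by omega
        have hlastgt : X < s + (b :: r).getD ((b :: r).length - 1) 0 := by
          rw [List.getD_eq_getElem _ 0 (by omega)]
          exact hmax _ (by omega) (by omega)
        have hpwd : (s :: (b :: r).dropLast).Pairwise (· ≤ ·) :=
          hpw.sublist (List.Sublist.cons₂ s (List.dropLast_sublist _))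
        have hlen' : (b :: r).dropLast.length ≤ n := by
          simp only [List.length_dropLast]; simp only [List.length_cons] at hlen ⊢; omega
        have hjd : j < (b :: r).dropLast.length := by
          simp only [List.length_dropLast]; omega
        have hgd : (b :: r).dropLast[j]'hjd = (b :: r)[j] := List.getElem_dropLast ..
        have hIH := ih s ((b :: r).dropLast) hlen' hpwd j hjd
          (by rw [hgd]; exact hfit)
          (by intro k hk hjk
              have hke : (b :: r).dropLast[k]'hk = (b :: r)[k]'(by
                simp only [List.length_dropLast] at hk; omega) := List.getElem_dropLast ..
              rw [hke]; exact hmax _ _ hjk)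
        have hdecomp : (b :: r).dropLast ++ [(b :: r).getLast (by simp)] = b :: r :=
          List.dropLast_append_getLast _
        have hlastD : (b :: r).getLast (by simp) = (b :: r).getD ((b :: r).length - 1) 0 := by
          rw [List.getLast_eq_getElem, List.getD_eq_getElem _ 0 (by omega)]
        have herase : (b :: r).eraseIdx j
            = (b :: r).dropLast.eraseIdx j ++ [(b :: r).getLast (by simp)] := by
          conv_lhs => rw [← hdecomp]
          exact List.eraseIdx_append_of_lt_length hjd _
        have happ : gG X ((b :: r).eraseIdx j) = 1 + gG X ((b :: r).dropLast.eraseIdx j) := by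
          rw [herase]
          refine gG_append_last X _ _ (fun x hx => ?_)
          have hxM : x ∈ b :: r :=
            (List.dropLast_sublist _).subset ((List.eraseIdx_sublist _ j).subset hx)
          have hsx : s ≤ x := List.rel_of_pairwise_cons hpw hxM
          rw [hlastD]; omega
        conv_lhs => rw [gG]
        rw [if_neg (by omega), hIH, happ]

-- ---- A's outer loop computes gG on the (sorted) working list ----

lemma loopA_eq (X : Int) : ∀ (n : Nat) (SF : List Int), SF.length ≤ n →
    SF.Pairwise (· ≤ ·) →
    ∀ (D : List Int) (i : Int), (i < 0 → gG X SF = (SF.length : Int)) →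
    loopA X SF D i = (D.length : Int) + gG X SF := by
  intro n
  induction n with
  | zero =>
    intro SF hlen _ D i _
    have : SF = [] := List.eq_nil_of_length_eq_zero (by omega)
    subst this; rw [loopA]; simp [gG]
  | succ n ih =>
    intro SF hlen hpw D i hi
    match SF with
    | [] => rw [loopA]; simp [gG]
    | s :: SF' =>
      rw [loopA]
      by_cases hineg : i < 0
      · rw [if_pos hineg, hi hineg]
        simp only [List.length_cons]; push_cast; ring
      · rw [if_neg hineg]
        by_cases hSF' : SF' = []
        · subst hSF'; rw [dif_pos rfl]
          simp [gG]
        · rw [dif_neg hSF']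
          have hpos : 0 < SF'.length := List.length_pos_iff.mpr hSF'
          set j := scanA SF' s X (SF'.length - 1) with hjdef
          have hjlt : j < SF'.length := lt_of_le_of_lt (scanA_le SF' s X _) (by omega)
          have hget : SF'.getD j 0 = SF'[j] := List.getD_eq_getElem SF' 0 hjlt
          have hall : ∀ (k : Nat) (hk : k < SF'.length), j < k → X < SF'[k] + s := by
            intro k hk hjk
            have := scanA_gt SF' s X (SF'.length - 1) k hjk (by omega)
            rwa [List.getD_eq_getElem SF' 0 hk] at this
          have hs_le : ∀ x ∈ SF', s ≤ x := fun x hx => List.rel_of_pairwise_cons hpw hx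
          have hpw' : SF'.Pairwise (· ≤ ·) := hpw.of_cons
          by_cases hbreak : X < SF'.getD j 0 + s
          · rw [if_pos hbreak]
            have hj0 : j = 0 := by
              by_contra h0
              have := scanA_fit SF' s X (SF'.length - 1) (Nat.pos_of_ne_zero (by
                simpa [hjdef] using h0))
              rw [← hjdef] at this; omega
            have hbreak0 : X < SF'.getD 0 0 + s := by rw [← hj0]; exact hbreak
            rw [List.getD_eq_getElem SF' 0 hpos] at hbreak0
            have hallx : ∀ x ∈ SF', X < s + x := by
              intro x hx
              obtain ⟨k, hk, rfl⟩ := List.mem_iff_getElem.mp hx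
              rcases Nat.eq_zero_or_pos k with hk0 | hk0
              · subst hk0; omega
              · have := hall k hk (by omega); omega
            have hpwgt : (s :: SF').Pairwise (fun a b => X < a + b) :=
              List.pairwise_cons.mpr ⟨hallx, pairwise_gt_of X s SF' hpw' hs_le hallx⟩
            rw [gG_singles X (s :: SF').length _ le_rfl hpwgt]
            simp only [List.length_cons, List.length_append, List.length_nil]
            push_cast; ring
          · rw [if_neg hbreak]
            have herlen : (SF'.eraseIdx j).length = SF'.length - 1 := by
              rw [List.length_eraseIdx]; simp [hjlt]
            have hcond : ((j : Int) - 1 < 0 → gG X (SF'.eraseIdx j) = ((SF'.eraseIdx j).length : Int)) := by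
              intro hj1
              have hj0 : j = 0 := by omega
              rw [hj0, List.eraseIdx_zero]
              have htsub : SF'.tail.Sublist SF' := List.tail_sublist SF'
              have hallt : ∀ x ∈ SF'.tail, X < s + x := by
                intro x hx
                obtain ⟨k, hk, rfl⟩ := List.mem_iff_getElem.mp hx
                rw [List.getElem_tail]
                have := hall (k + 1) (by simp only [List.length_tail] at hk; omega) (by omega)
                omega
              have := pairwise_gt_of X s SF'.tail (hpw'.sublist htsub)
                (fun x hx => hs_le x (htsub.subset hx)) hallt
              exact gG_singles X SF'.tail.length _ le_rfl this
            have hIH := ih (SF'.eraseIdx j) (by simp only [List.length_cons] at hlen; omega)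
              (hpw'.sublist (List.eraseIdx_sublist SF' j)) (D ++ [SF'.getD j 0 + s])
              ((j : Int) - 1) hcond
            rw [hIH]
            rw [gG_key X SF'.length s SF' le_rfl hpw j hjlt (by rw [hget] at hbreak; omega)
              (by intro k hk hjk; have := hall k hk hjk; omega)]
            simp only [List.length_append, List.length_cons, List.length_nil]
            push_cast; ring

-- ---- B's two-pointer loop computes gG on the segment a[lo..hi] ----

def segI (a : List Int) (lo hi : Int) : List Int := (a.drop lo.toNat).take (hi + 1 - lo).toNat

lemma segI_len (a : List Int) (lo hi : Int) (h0 : 0 ≤ lo) (hhi : hi < (a.length : Int)) :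
    (segI a lo hi).length = (hi + 1 - lo).toNat := by
  unfold segI; rw [List.length_take, List.length_drop]; omega

lemma segI_cons (a : List Int) (lo hi : Int) (h0 : 0 ≤ lo) (hlh : lo ≤ hi)
    (hhi : hi < (a.length : Int)) :
    segI a lo hi = a[lo.toNat]'(by omega) :: segI a (lo + 1) hi := by
  unfold segI
  rw [List.drop_eq_getElem_cons (by omega : lo.toNat < a.length)]
  rw [show (hi + 1 - lo).toNat = (hi + 1 - (lo + 1)).toNat + 1 from by omega]
  rw [List.take_succ_cons, show (lo + 1).toNat = lo.toNat + 1 from by omega]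

lemma segI_dropLast (a : List Int) (lo hi : Int) (h0 : 0 ≤ lo)
    (hhi : hi < (a.length : Int)) :
    (segI a lo hi).dropLast = segI a lo (hi - 1) := by
  unfold segI
  rw [List.dropLast_eq_take, List.take_take, List.length_take, List.length_drop]
  congr 1
  omega

lemma segI_lastD (a : List Int) (lo hi : Int) (h0 : 0 ≤ lo) (hlh : lo ≤ hi)
    (hhi : hi < (a.length : Int)) :
    (segI a lo hi).getD ((segI a lo hi).length - 1) 0 = a[hi.toNat]'(by omega) := by
  have hlen := segI_len a lo hi h0 hhi
  rw [List.getD_eq_getElem _ 0 (by rw [hlen]; omega)]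
  unfold segI
  rw [List.getElem_take, List.getElem_drop]
  refine getElem_idx_eq a _ _ ?_ (by omega)
  have h1 : (segI a lo hi).length = (hi + 1 - lo).toNat := hlen
  unfold segI at h1
  omega

lemma loopB_eq (a : List Int) (X : Int) : ∀ (n : Nat) (lo hi : Int),
    (hi + 1 - lo).toNat ≤ n → 0 ≤ lo → hi < (a.length : Int) →
    ∀ (g0 : Int), loopB a X lo hi g0 = g0 + gG X (segI a lo hi) := by
  intro n
  induction n with
  | zero =>
    intro lo hi hn h0 hhi g0
    rw [loopB, dif_neg (by omega)]
    have hnil : segI a lo hi = [] :=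
      List.eq_nil_of_length_eq_zero (by rw [segI_len a lo hi h0 hhi]; omega)
    rw [hnil]; simp [gG]
  | succ n ih =>
    intro lo hi hn h0 hhi g0
    by_cases hlh : lo ≤ hi
    · rw [loopB, dif_pos hlh]
      have hlor : lo.toNat < a.length := by omega
      have hhir : hi.toNat < a.length := by omega
      by_cases hlt : lo < hi
      · have hgl : PySem.List.pyGetD a lo 0 = a[lo.toNat]'hlor := by
          apply PySem.List.pyGetD_eq_getElem <;> omega
        have hgh : PySem.List.pyGetD a hi 0 = a[hi.toNat]'hhir := by
          apply PySem.List.pyGetD_eq_getElem <;> omega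
        have hseg1 : segI a lo hi = a[lo.toNat]'hlor :: segI a (lo + 1) hi :=
          segI_cons a lo hi h0 hlh hhi
        have hseg2 : segI a (lo + 1) hi ≠ [] := by
          have hl := segI_len a (lo + 1) hi (by omega) hhi
          intro hnil; rw [hnil] at hl; simp at hl; omega
        obtain ⟨b, r, hbr⟩ := List.exists_cons_of_ne_nil hseg2
        have hlast : (b :: r).getD ((b :: r).length - 1) 0 = a[hi.toNat]'hhir := by
          rw [← hbr]; exact segI_lastD a (lo + 1) hi (by omega) (by omega) hhi
        have hdrop : (b :: r).dropLast = segI a (lo + 1) (hi - 1) := by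
          rw [← hbr]; exact segI_dropLast a (lo + 1) hi (by omega) hhi
        by_cases hfit : PySem.List.pyGetD a lo 0 + PySem.List.pyGetD a hi 0 ≤ X
        · rw [if_pos ⟨hlt, hfit⟩]
          rw [ih (lo + 1) (hi - 1) (by omega) (by omega) (by omega)]
          rw [hseg1, hbr, gG, hlast, if_pos (by rw [hgl, hgh] at hfit; omega), hdrop]
          ring
        · rw [if_neg (by rintro ⟨-, h⟩; exact hfit h)]
          rw [ih lo (hi - 1) (by omega) h0 (by omega)]
          rw [hseg1, hbr, gG, hlast, if_neg (by rw [hgl, hgh] at hfit; omega), hdrop]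
          rw [show (a[lo.toNat]'hlor) :: segI a (lo + 1) (hi - 1) = segI a lo (hi - 1) from
            (segI_cons a lo (hi - 1) h0 (by omega) (by omega)).symm]
          ring
      · rw [if_neg (by rintro ⟨h, -⟩; omega)]
        rw [ih lo (hi - 1) (by omega) h0 (by omega)]
        have hempty : segI a lo (hi - 1) = [] :=
          List.eq_nil_of_length_eq_zero (by rw [segI_len a lo (hi - 1) h0 (by omega)]; omega)
        rw [hempty]
        rw [gG_len_one X (segI a lo hi) (by rw [segI_len a lo hi h0 hhi]; omega)]
        simp only [gG]; ring
    · rw [loopB, dif_neg hlh]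
      have hnil : segI a lo hi = [] :=
        List.eq_nil_of_length_eq_zero (by rw [segI_len a lo hi h0 hhi]; omega)
      rw [hnil]; simp [gG]

-- ===== VERDICT (by name: the statement is the Claim_ definition above) =====
theorem process_func_spec : Claim_equal_process_func := by
  intro fi _
  unfold Spec_process_func process_func process_func_alt
  set a := PySem.List.sorted fi.2.2 (fun x => x) false with ha
  have hpw : a.Pairwise (· ≤ ·) := by
    simpa using PySem.List.sorted_pairwise (xs := fi.2.2) (key := fun x => x)
  have hA : loopA fi.2.1 a [] ((a.length : Int) - 1) = (0 : Int) + gG fi.2.1 a := by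
    refine loopA_eq fi.2.1 a.length a le_rfl hpw [] _ ?_
    intro hneg
    have : a = [] := List.eq_nil_of_length_eq_zero (by omega)
    rw [this]; simp [gG]
  have hB : loopB a fi.2.1 0 ((a.length : Int) - 1) 0
      = (0 : Int) + gG fi.2.1 (segI a 0 ((a.length : Int) - 1)) :=
    loopB_eq a fi.2.1 a.length 0 _ (by omega) le_rfl (by omega) 0
  have hseg : segI a 0 ((a.length : Int) - 1) = a := by
    unfold segI
    rw [show ((a.length : Int) - 1 + 1 - 0).toNat = a.length from by omega]
    simp
  simp only [hA, hB, hseg]
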